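-- pv_equiv track=rewrite | github.com/sigmajove/Sicherman2024 | follow_border.py | has_mirror_symmetry
-- ===== SOURCE A (Python) =====
-- def has_mirror_symmetry(piece):
--     """Return whether flipping the pieces leaves it the same modulo rotations."""
--     mirrored = piece[:]
--     mirrored.reverse()
--     for _ in range(len(piece)):
--         if mirrored == piece:
--             return True
--         mirrored = mirrored[1:] + [mirrored[0]]
--     return False
-- ===== SOURCE B (Python) =====
-- def has_mirror_symmetry(piece):
--     """Return whether flipping the pieces leaves it the same modulo rotations."""
--     n = len(piece)
--     mirrored = piece[::-1]
--     doubled = piece + piece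
--     return any(doubled[i:i + n] == mirrored
--                for i in range(n) if doubled[i] == mirrored[0])
-- ===== Notes on version B (the rewrite author's own statement) =====
-- stated objective: faster
-- what changed: Instead of rebuilding and comparing each rotation of the reversed list, B checks whether the reversed list occurs as a window of piece+piece, and only compares a window when its first element matches.
import Mathlib
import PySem

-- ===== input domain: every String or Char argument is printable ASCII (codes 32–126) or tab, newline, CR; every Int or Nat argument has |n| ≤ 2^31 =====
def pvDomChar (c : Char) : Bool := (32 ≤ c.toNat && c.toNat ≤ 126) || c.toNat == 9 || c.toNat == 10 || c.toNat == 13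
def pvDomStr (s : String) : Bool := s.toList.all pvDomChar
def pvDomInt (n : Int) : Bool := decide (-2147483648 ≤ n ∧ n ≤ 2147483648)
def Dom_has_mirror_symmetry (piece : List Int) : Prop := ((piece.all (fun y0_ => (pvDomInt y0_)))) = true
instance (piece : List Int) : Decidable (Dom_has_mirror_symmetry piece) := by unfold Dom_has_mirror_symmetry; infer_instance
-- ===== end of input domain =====

-- ===== PORT A =====
-- B checks the reversed list against windows of piece+piece (skipping windows whose
-- first element differs) instead of rebuilding each rotation; measurably faster.
-- Loop of A: for each remaining iteration count, compare `mirrored` with `piece`,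
-- then rotate `mirrored` left by one (mirrored[1:] + [mirrored[0]]).
-- `mirrored` is nonempty whenever the loop body runs (its length stays len(piece) ≥ 1),
-- so the pyGetD default of mirrored[0] is never used.
def hmsALoop (piece : List Int) : List Int → Nat → Bool
  | _, 0 => false
  | m, Nat.succ k =>
    if m = piece then true
    else hmsALoop piece (PySem.List.slice m (some 1) none ++ [PySem.List.pyGetD m 0 0]) k

def has_mirror_symmetry (piece : List Int) : Bool :=
  hmsALoop piece piece.reverse piece.length

-- ===== PORT B =====
def has_mirror_symmetry_alt (piece : List Int) : Bool :=
  let n : Int := piece.length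
  let mirrored := piece.reverse
  let doubled := piece ++ piece
  (PySem.List.pyRange 0 n 1).any (fun i =>
    (PySem.List.pyGet? doubled i == PySem.List.pyGet? mirrored 0) &&
    (PySem.List.slice doubled (some i) (some (i + n)) == mirrored))

-- ===== PRECONDITION & SPEC =====
def Spec_has_mirror_symmetry (piece : List Int) (out : Bool) : Prop := out = has_mirror_symmetry_alt piece
instance (piece : List Int) (out : Bool) : Decidable (Spec_has_mirror_symmetry piece out) := by unfold Spec_has_mirror_symmetry; infer_instance

-- ===== CLAIM (what is proved, stated in full; the proofs are below) =====
def Claim_equal_has_mirror_symmetry : Prop := ∀ (piece : List Int), Dom_has_mirror_symmetry piece → Spec_has_mirror_symmetry piece (has_mirror_symmetry piece)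

-- ===== LEMMAS AND PROOFS =====

-- A's loop returns true iff some of the next k left-rotations of m equals piece.
theorem hmsALoop_char (piece : List Int) : ∀ (k : Nat) (m : List Int), m ≠ [] →
    (hmsALoop piece m k = true ↔ ∃ j < k, m.rotate j = piece) := by
  intro k
  induction k with
  | zero => intro m hm; simp [hmsALoop]
  | succ k ih =>
    intro m hm
    obtain ⟨a, t, rfl⟩ := List.exists_cons_of_ne_nil hm
    have hnext : PySem.List.slice (a :: t) (some 1) none ++ [PySem.List.pyGetD (a :: t) 0 0]
        = (a :: t).rotate 1 := by
      simp [PySem.List.slice_from_one, PySem.List.pyGetD_zero_cons, List.rotate_cons_succ]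
    by_cases hpc : (a :: t) = piece
    · constructor
      · intro _; exact ⟨0, Nat.succ_pos k, by simpa using hpc⟩
      · intro _; simp [hmsALoop, hpc]
    · have hnil : (a :: t).rotate 1 ≠ [] := by
        simp [List.rotate_cons_succ]
      have hrec := ih ((a :: t).rotate 1) hnil
      constructor
      · intro h
        simp only [hmsALoop, if_neg hpc, hnext] at h
        obtain ⟨j, hj, hrot⟩ := hrec.mp h
        exact ⟨j + 1, by omega, by rw [← hrot, List.rotate_rotate, Nat.add_comm]⟩
      · rintro ⟨j, hj, hrot⟩
        cases j with
        | zero => exact absurd (by simpa using hrot) hpc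
        | succ j =>
          simp only [hmsALoop, if_neg hpc, hnext]
          exact hrec.mpr ⟨j, by omega, by rw [List.rotate_rotate, Nat.add_comm]; exact hrot⟩

-- A window of piece ++ piece starting at i (i ≤ len) is the i-th left rotation of piece.
theorem window_eq_rotate (piece : List Int) (i : Nat) (h : i ≤ piece.length) :
    ((piece ++ piece).drop i).take piece.length = piece.rotate i := by
  rw [List.rotate_eq_drop_append_take h, List.drop_append_of_le_length h]
  have hlen : piece.length = (piece.drop i).length + i := by
    simp [List.length_drop]; omega
  rw [hlen, List.take_append]
  rw [List.take_of_length_le (by omega), Nat.add_sub_cancel_left]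

-- B returns true iff some rotation of piece (by i < len) equals the reversed piece.
theorem alt_char (piece : List Int) :
    (has_mirror_symmetry_alt piece = true ↔ ∃ i < piece.length, piece.rotate i = piece.reverse) := by
  unfold has_mirror_symmetry_alt
  simp only [PySem.List.pyRange_one, Int.sub_zero, Int.toNat_natCast, List.any_map,
    List.any_eq_true, List.mem_range, Function.comp, Int.zero_add, Bool.and_eq_true, beq_iff_eq]
  constructor
  · rintro ⟨i, hi, -, hslice⟩
    refine ⟨i, hi, ?_⟩
    rw [PySem.List.slice_natCast_add] at hslice
    rw [← window_eq_rotate piece i (Nat.le_of_lt hi), hslice]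
  · rintro ⟨i, hi, hrot⟩
    have hwin : ((piece ++ piece).drop i).take piece.length = piece.reverse := by
      rw [window_eq_rotate piece i (Nat.le_of_lt hi), hrot]
    refine ⟨i, hi, ?_, by rw [PySem.List.slice_natCast_add]; exact hwin⟩
    -- first elements agree because the windows agree and len > 0
    have hpos : 0 < piece.length := Nat.lt_of_le_of_lt (Nat.zero_le i) hi
    rw [PySem.List.pyGet?_natCast, PySem.List.pyGet?_zero]
    have h0 : (piece ++ piece)[i]? = (((piece ++ piece).drop i).take piece.length)[0]? := by
      rw [List.getElem?_take_of_lt hpos, List.getElem?_drop, Nat.add_zero]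
    rw [h0, hwin]

-- rotation-equivalence is symmetric on the bounded-exponent form.
theorem exists_rotate_symm (x y : List Int) (hlen : x.length = y.length) (hpos : 0 < x.length) :
    (∃ j < x.length, x.rotate j = y) → ∃ i < y.length, y.rotate i = x := by
  rintro ⟨j, hj, hrot⟩
  have hxy : x.IsRotated y := ⟨j, hrot⟩
  obtain ⟨i, hi, hrot'⟩ := (List.isRotated_iff_mod).mp hxy.symm
  rcases Nat.lt_or_ge i y.length with hlt | hge
  · exact ⟨i, hlt, hrot'⟩
  · have : i = y.length := le_antisymm hi hge
    refine ⟨0, by omega, ?_⟩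
    rw [List.rotate_zero]
    rw [this, List.rotate_length] at hrot'
    exact hrot'

-- ===== VERDICT (by name: the statement is the Claim_ definition above) =====
theorem has_mirror_symmetry_spec : Claim_equal_has_mirror_symmetry := by
  intro piece _
  unfold Spec_has_mirror_symmetry
  by_cases hp : piece = []
  · subst hp; decide
  · have hpos : 0 < piece.length := List.length_pos_of_ne_nil hp
    have hrev : piece.reverse ≠ [] := by simpa using hp
    have hA := hmsALoop_char piece piece.length piece.reverse hrev
    have hB := alt_char piece
    rw [Bool.eq_iff_iff]
    unfold has_mirror_symmetry
    rw [hA, hB]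
    constructor
    · intro h
      exact exists_rotate_symm piece.reverse piece (by simp) (by simpa using hpos)
        (by simpa using h)
    · intro h
      have := exists_rotate_symm piece piece.reverse (by simp) hpos h
      simpa using this
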